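/-
  THE CONTRACTS OF THE MDCT REGION AT THEIR CALL SITES: the lemmas a worker of a CALLING unit applies, and the non-vacuity
  checks of the Specs of Vorbis/Spec/Mdct.lean and Vorbis/Spec/MdctTop.lean (the caller's facts ⇒ the callee's precondition).

      imdct_step3_iter0_loop.pre_of_call            inverse_mdct.5, the two iter0 calls      (`Mdct.Call.iter0`)
      imdct_step3_inner_r_loop.pre_of_call_r1       inverse_mdct.5, the four r_loop calls    (`Mdct.Call.r1`)
      imdct_step3_inner_r_loop.pre_of_call_first    inverse_mdct.6, r_loop per `(l, i)`      (`Mdct.Call.firstL`, `firstL_call`)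
      imdct_step3_inner_s_loop.pre_of_call          inverse_mdct.7, s_loop per `(l, t)`      (`Mdct.Call.secondL`, `secondL_call`)
      imdct_step3_inner_s_loop_ld654.pre_of_call    inverse_mdct.7, the ld654 call           (`Mdct.Call.ld654`)
      iter_54.pre_of_call                           imdct_step3_inner_s_loop_ld654.2, the two iter_54 calls
      compute_bitreverse.pre_of_call                init_blocksize: the new block of `n / 4` bytes
      get_window.window_block                       vorbis_finish_frame: a non-NULL result is the window block of `len` floats
      inverse_mdct.storeOK                          vorbis_decode_packet_rest.12: the footprint as `StoreOK` spans (for `DecodeInv.frame_stores`)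
      inverse_mdct.pre_of_fb                        vorbis_decode_packet_rest.12: the caller's `DecodeInv` + the arguments ⇒ `inverse_mdct.Pre`
      inverse_mdct.Pre.tabA_blk … .tmp_range        what the precondition gives a segment's worker; Pre.blkLive, tmp_live (check sites)
      inverse_mdct.Body.carry                       THE FRAME RULE of a segment: `Body` at the exit from `Body` at the entry and one `SameExcept`
      inverse_mdct.Body.objEq / tabA_eq … / rev     `*f` reads as at the entry (pointer re-loads), M4 in the present memory

  Every lemma takes the callee's ENTRY state `s` with the argument registers as hypotheses, in the forms a walk produces after
  `arg32_sext` / `IsNeg32` have turned the 32-bit arguments into numbers.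
-/
import Vorbis.Spec.MdctTop
namespace Vorbis.Spec
open X86 X86.User Asan

variable {others : List Obj} {frames : List (Nat × FrameLayout)}

/-! ### The step-3 helpers at inverse_mdct's call sites

`ubuf` = the sample buffer `u` (a channel buffer of `4 b1 ≥ 4 n` live bytes: its first `n / 2` floats are all step 3 touches),
`tab` = the twiddle table `A` (`2 n` live bytes = `n / 2` floats). -/

/-- **iter0 call number `j ≤ 1`** (lines 2767–2768): `imdct_step3_iter0_loop(n >> 4, u, n2 − 1 − n4·j, −(n >> 3), A)`. -/
theorem imdct_step3_iter0_loop.pre_of_call {n j ubuf tab : Nat} {s : State} (hn : Mdct.IsBlocksize n) (hj : j ≤ 1)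
    (hsh : ShadowPre others frames s)
    (hu : LiveBytes others frames ubuf (4 * (n / 2))) (hA : LiveBytes others frames tab (2 * n))
    (hrdi : arg32 s .rdi = n / 16) (hrsi : (s.reg .rsi).toNat = ubuf) (hrdx : arg32 s .rdx = n / 2 - 1 - n / 4 * j)
    (hrcx : IsNeg32 s .rcx (n / 8)) (hr8 : (s.reg .r8).toNat = tab) :
    (imdct_step3_iter0_loop.spec others frames (n / 2) (n / 2 - 1 - n / 4 * j) (n / 8)).pre s := by
  have hc := Mdct.Call.iter0 hn hj
  have hf := hn.facts
  have hq : quarter s = n / 64 := by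
    rw [quarter_def, ← arg32_def, hrdi]
    omega
  refine ⟨hsh, by omega, hrdx, hrcx, ?_, ?_, ?_⟩
  · rw [hq]
    exact hc.e
  · rw [hrsi]
    exact hu
  · intro _
    rw [hq, hr8]
    exact hA.sub tab _ (Nat.le_refl _) (by omega)

/-- **r_loop call number `j ≤ 3` of iteration 1** (lines 2771–2774):
`imdct_step3_inner_r_loop(n >> 5, u, n2 − 1 − n8·j, −(n >> 4), A, 16)`. For `n = 64` the count `m` is 0: nothing is accessed. -/
theorem imdct_step3_inner_r_loop.pre_of_call_r1 {n j ubuf tab : Nat} {s : State} (hn : Mdct.IsBlocksize n) (hj : j ≤ 3)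
    (hsh : ShadowPre others frames s)
    (hu : LiveBytes others frames ubuf (4 * (n / 2))) (hA : LiveBytes others frames tab (2 * n))
    (hrdi : arg32 s .rdi = n / 32) (hrsi : (s.reg .rsi).toNat = ubuf) (hrdx : arg32 s .rdx = n / 2 - 1 - n / 8 * j)
    (hrcx : IsNeg32 s .rcx (n / 16)) (hr8 : (s.reg .r8).toNat = tab) (hr9 : arg32 s .r9 = 16) :
    (imdct_step3_inner_r_loop.spec others frames (n / 2) (n / 2 - 1 - n / 8 * j) (n / 16) 16).pre s := by
  have hc := Mdct.Call.r1 hn hj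
  have hf := hn.facts
  have hq : quarter s = n / 128 := by
    rw [quarter_def, ← arg32_def, hrdi]
    omega
  refine ⟨hsh, by omega, hrdx, hrcx, hr9, by omega, ?_, ?_, ?_⟩
  · rw [hq]
    exact hc.e
  · rw [hrsi]
    exact hu
  · intro hm
    rw [hq] at hm ⊢
    rw [hr8]
    have hA' := hc.A hm
    exact hA.sub tab _ (Nat.le_refl _) (by omega)

/-- **r_loop call `(l, i)` of the first `l` loop** (line 2782), `InFirst k l`, `i < lim l`:
`imdct_step3_inner_r_loop(n >> (l + 4), u, n2 − 1 − k0·i, −k0_2, A, 1 << (l + 3))`. -/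
theorem imdct_step3_inner_r_loop.pre_of_call_first {n k l i ubuf tab : Nat} {s : State} (hk : Mdct.Ld n k)
    (hl : Mdct.InFirst k l) (hi : i < Mdct.lim l) (hsh : ShadowPre others frames s)
    (hu : LiveBytes others frames ubuf (4 * (n / 2))) (hA : LiveBytes others frames tab (2 * n))
    (hrdi : arg32 s .rdi = n >>> (l + 4)) (hrsi : (s.reg .rsi).toNat = ubuf)
    (hrdx : arg32 s .rdx = n / 2 - 1 - Mdct.k0 n l * i) (hrcx : IsNeg32 s .rcx (Mdct.k02 n l))
    (hr8 : (s.reg .r8).toNat = tab) (hr9 : arg32 s .r9 = Mdct.k1 l) :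
    (imdct_step3_inner_r_loop.spec others frames (n / 2) (n / 2 - 1 - Mdct.k0 n l * i) (Mdct.k02 n l) (Mdct.k1 l)).pre s := by
  have hc := Mdct.Call.firstL hk hl
  have hci := Mdct.Call.firstL_call hk hl hi
  have hf := hk.isBlocksize.facts
  have hq : quarter s = Mdct.rlim n l := by
    rw [quarter_def, ← arg32_def, hrdi, ← hc.m_eq, Nat.shiftRight_eq_div_pow (n >>> (l + 4)) 2]
  have hk1 : Mdct.k1 l ≤ 2 ^ 9 := by
    have := hc.counts
    unfold Mdct.k1
    rw [Nat.shiftLeft_eq, Nat.one_mul]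
    exact Nat.pow_le_pow_right (by decide) (by omega)
  have hdi : arg32 s .rdi < 2 ^ 31 := by
    rw [hrdi, Nat.shiftRight_eq_div_pow]
    have : n / 2 ^ (l + 4) ≤ n := Nat.div_le_self _ _
    omega
  refine ⟨hsh, hdi, hrdx, hrcx, hr9, by omega, ?_, ?_, ?_⟩
  · rw [hq]
    exact hci.2
  · rw [hrsi]
    exact hu
  · intro _
    rw [hq, hr8]
    have hA' := hc.A
    exact hA.sub tab _ (Nat.le_refl _) (by omega)

/-- **s_loop call of round `t < rlim` of the second `l` loop** (line 2793), `InSecond k l`: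
`imdct_step3_inner_s_loop(lim, u, n2 − 1 − 8 t, −k0_2, A + 4·k1·t floats, k1, k0)`; the seventh argument is the dword at
`[rsp + 8]` of the callee's entry state (`push r14` after `sub rsp, 8`). `tab0` = the value of `A0 = A + 16·k1·t` bytes. -/
theorem imdct_step3_inner_s_loop.pre_of_call {n k l t ubuf tab tab0 : Nat} {s : State} (hk : Mdct.Ld n k)
    (hl : Mdct.InSecond k l) (ht : t < Mdct.rlim n l) (hsh : ShadowPre others frames s)
    (hu : LiveBytes others frames ubuf (4 * (n / 2))) (hA : LiveBytes others frames tab (2 * n))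
    (htab : tab0 = tab + 4 * (4 * Mdct.k1 l * t))
    (hrdi : arg32 s .rdi = Mdct.lim l) (hrsi : (s.reg .rsi).toNat = ubuf) (hrdx : arg32 s .rdx = n / 2 - 1 - 8 * t)
    (hrcx : IsNeg32 s .rcx (Mdct.k02 n l)) (hr8 : (s.reg .r8).toNat = tab0) (hr9 : arg32 s .r9 = Mdct.k1 l)
    (hk0 : s.mem.readLE (s.reg .rsp + 8) 4 = Mdct.k0 n l) :
    (imdct_step3_inner_s_loop.spec others frames (n / 2) (n / 2 - 1 - 8 * t) (Mdct.k02 n l) (Mdct.k0 n l) (Mdct.k1 l)).pre s := by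
  have hc := Mdct.Call.secondL hk hl
  have hct := Mdct.Call.secondL_call hk hl ht
  have hf := hk.isBlocksize.facts
  have hk0le : Mdct.k0 n l ≤ n := by
    unfold Mdct.k0
    rw [Nat.shiftRight_eq_div_pow]
    exact Nat.div_le_self _ _
  have hk1 := hc.k1_le
  have hlim := hc.lim_le
  refine ⟨hsh, by omega, hrdx, hrcx, hr9, by omega, hk0, by omega, ?_, ?_, ?_⟩
  · rw [hrdi]
    exact hct.2.1
  · rw [hrsi]
    exact hu
  · rw [hr8, htab]
    have h3 := hct.2.2
    exact hA.sub _ _ (by omega) (by omega)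

/-- **The ld654 call** (line 2804): `imdct_step3_inner_s_loop_ld654(n >> 5, u, n2 − 1, A, n)`. -/
theorem imdct_step3_inner_s_loop_ld654.pre_of_call {n ubuf tab : Nat} {s : State} (hn : Mdct.IsBlocksize n)
    (hsh : ShadowPre others frames s)
    (hu : LiveBytes others frames ubuf (4 * (n / 2))) (hA : LiveBytes others frames tab (2 * n))
    (hrdi : arg32 s .rdi = n / 32) (hrsi : (s.reg .rsi).toNat = ubuf) (hrdx : arg32 s .rdx = n / 2 - 1)
    (hrcx : (s.reg .rcx).toNat = tab) (hr8 : arg32 s .r8 = n) :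
    (imdct_step3_inner_s_loop_ld654.spec others frames (n / 2) (n / 2 - 1)).pre s := by
  have hf := hn.facts
  refine ⟨hsh, by omega, hrdx, by omega, by omega, by omega, ?_, ?_⟩
  · rw [hrsi]
    exact hu
  · rw [hrcx, hr8]
    exact hA.sub _ _ (by omega) (by omega)

/-- **The two iter_54 calls of imdct_step3_inner_s_loop_ld654's iteration `t < n'`** (`q = 0`: `iter_54(z)`, `q = 1`:
`iter_54(z − 8)`): the eight floats lie in the run of `16 n'` floats below `z0 = e + 4 i0` that the precondition makes live. -/
theorem iter_54.pre_of_call {len i0 np t q e z : Nat} {s : State} (hrun : 16 * np ≤ i0 + 1) (hi0 : i0 < len)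
    (ht : t < np) (hq : q ≤ 1) (hsh : ShadowPre others frames s) (he : LiveBytes others frames e (4 * len))
    (hz : z + 64 * t + 32 * q = e + 4 * i0) (hrdi : (s.reg .rdi).toNat = z) :
    (iter_54.spec others frames).pre s := by
  refine ⟨hsh, by omega, ?_⟩
  rw [hrdi]
  exact he.sub _ _ (by omega) (by omega)

/-! ### `compute_bitreverse`, `get_window` at their call sites -/

/-- **compute_bitreverse's precondition inside init_blocksize** (line 1326): the new block of `n / 4` bytes is one live object. -/
theorem compute_bitreverse.pre_of_call {n k rev : Nat} {s : State} (hk : Mdct.Ld n k) (hsh : ShadowPre others frames s)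
    (hrev : LiveIn others frames rev (n / 4)) (hobj : Vorbis.Globals.log2_4.obj ∈ others) (hlog : Log2_4In s.mem)
    (hrdi : arg32 s .rdi = n) (hrsi : (s.reg .rsi).toNat = rev) :
    (compute_bitreverse.spec others frames k).pre s := by
  refine ⟨hsh, ?_, ?_, hobj, hlog⟩
  · rw [hrdi]
    exact hk
  · rw [hrdi, hrsi]
    exact LiveBytes.of_liveIn hrev

/-- **get_window's result at vorbis_finish_frame** (CONTRACTS 17, "with HD3 + M3 + M7"): `esi` holds `len = previous_length` in
M7's range; a NON-NULL result means `2·len` is one of the two block sizes, and the pointer returned is the allocated window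
block of exactly `len` floats. -/
theorem get_window.window_block {Blk : Block → Prop} {u v : State} {len : Int}
    (hpost : (get_window.spec others frames).post u v)
    (hd : Mdct.HD3 u.mem (u.reg .rdi).toNat) (hm : Mdct.MdctOK Blk u.mem (u.reg .rdi).toNat)
    (h7lo : -(bsize u.mem (u.reg .rdi).toNat 1 : Int) ≤ len) (h7hi : len ≤ ((bsize u.mem (u.reg .rdi).toNat 1 / 2 : Nat) : Int))
    (hlen : (u.reg .rsi).toNat % 2 ^ 32 = (len % 4294967296).toNat) (hne : v.reg .rax ≠ 0) :
    Blk ⟨(v.reg .rax).toNat, 4 * len.toNat⟩ := by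
  obtain ⟨_, h0, h1, hnull⟩ := hpost
  have hb0 := hd.b0.facts
  have hb1 := hd.b1.facts
  have hle := hd.le
  -- the compared value `t`
  have ht : (2 * (u.reg .rsi).toNat) % 2 ^ 32 = ((len + len) % 4294967296).toNat := by
    omega
  -- the two size fields as 32-bit patterns
  have e0 : u.mem.u32 ((u.reg .rdi).toNat + 152) = bsize u.mem (u.reg .rdi).toNat 0 := by
    have hb := hd.blocksize_0_eq
    simp only [vacc, voff] at hb
    unfold Mem.i32 sint32 at hb
    have hlt := Mem.u32_lt u.mem ((u.reg .rdi).toNat + 152)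
    split at hb <;> omega
  have e1 : u.mem.u32 ((u.reg .rdi).toNat + 156) = bsize u.mem (u.reg .rdi).toNat 1 := by
    have hb := hd.blocksize_1_eq
    simp only [vacc, voff] at hb
    unfold Mem.i32 sint32 at hb
    have hlt := Mem.u32_lt u.mem ((u.reg .rdi).toNat + 156)
    split at hb <;> omega
  by_cases c0 : u.mem.u32 ((u.reg .rdi).toNat + 152) = (2 * (u.reg .rsi).toNat) % 2 ^ 32
  · rw [h0 c0]
    apply hm.window_of_len (by decide)
    have := (Mdct.get_window_arith (b := bsize u.mem (u.reg .rdi).toNat 0) h7lo h7hi (by omega) (by omega)).mp (by omega)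
    exact this
  · by_cases c1 : u.mem.u32 ((u.reg .rdi).toNat + 156) = (2 * (u.reg .rsi).toNat) % 2 ^ 32
    · rw [h1 c0 c1]
      apply hm.window_of_len (by decide)
      have := (Mdct.get_window_arith (b := bsize u.mem (u.reg .rdi).toNat 1) h7lo h7hi (by omega) (by omega)).mp (by omega)
      exact this
    · exact absurd (hnull c0 c1) hne

/-- One more live object: live bytes stay live. -/
theorem LiveBytes.cons {others : List Obj} {frames : List (Nat × FrameLayout)} {a n : Nat} (o : Obj)
    (h : LiveBytes others frames a n) : LiveBytes (o :: others) frames a n := by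
  intro i hi
  obtain ⟨o', ho', hb⟩ := h i hi
  refine ⟨o', ?_, hb⟩
  rcases List.mem_append.mp ho' with hs | hoth
  · exact List.mem_append_left _ hs
  · exact List.mem_append_right _ (List.mem_cons_of_mem _ hoth)

/-! ### inverse_mdct: what the precondition and the cut-point assertions give a segment's worker -/

namespace inverse_mdct
variable {len : Nat} {A : Arena} {stored room : Int} {ysz : Nat → Nat} {k c : Nat} {ue : State}

/-- The block size as the straight loops' lemmas take it (`Mdct.L1 … S8`, `Mdct.Call.iter0 …`). -/
theorem Pre.isBlocksize (h : Pre others frames len A stored room ysz k c ue) : Mdct.IsBlocksize (n ue) := h.ld.isBlocksize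

/-- `n ≤ b1`: the `n` floats of the frame fit the channel buffer. -/
theorem Pre.n_le (h : Pre others frames len A stored room ysz k c ue) : n ue ≤ bsize ue.mem (f ue) 1 := by
  rw [h.nEq]
  exact h.hd3.le_b1 (bt ue)

/-- M3: the twiddle table `A` is the allocated block of `2 n` bytes (`n / 2` floats). -/
theorem Pre.tabA_blk (h : Pre others frames len A stored room ysz k c ue) : RunBlk A len ⟨tabA ue, 2 * n ue⟩ := by
  rw [tabA_def, h.nEq]
  exact (h.mdct.M3 (bt ue) h.btLt).A

/-- M3: the table `B` is the allocated block of `2 n` bytes. -/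
theorem Pre.tabB_blk (h : Pre others frames len A stored room ysz k c ue) : RunBlk A len ⟨tabB ue, 2 * n ue⟩ := by
  rw [tabB_def, h.nEq]
  exact (h.mdct.M3 (bt ue) h.btLt).B

/-- M3: the table `C` is the allocated block of `n` bytes (`n / 4` floats). -/
theorem Pre.tabC_blk (h : Pre others frames len A stored room ysz k c ue) : RunBlk A len ⟨tabC ue, n ue⟩ := by
  rw [tabC_def, h.nEq]
  exact (h.mdct.M3 (bt ue) h.btLt).C

/-- M3: the bit-reverse table is the allocated block of `n / 4` bytes (`n / 8` `uint16`). -/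
theorem Pre.tabR_blk (h : Pre others frames len A stored room ysz k c ue) : RunBlk A len ⟨tabR ue, n ue / 4⟩ := by
  rw [tabR_def, h.nEq]
  exact (h.mdct.M3 (bt ue) h.btLt).bit_reverse

/-- M4 in the ENTRY memory: every entry of the table is at most `n / 2 − 4`. -/
theorem Pre.rev (h : Pre others frames len A stored room ysz k c ue) : Mdct.RevOK ue.mem (tabR ue) (n ue) := by
  rw [tabR_def, h.nEq]
  exact h.mdct.M4 (bt ue) h.btLt

/-- M6: the buffer passed is the allocated block of `4 b1` bytes. -/
theorem Pre.buf_blk (h : Pre others frames len A stored room ysz k c ue) : RunBlk A len ⟨buf ue, 4 * bsize ue.mem (f ue) 1⟩ := by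
  rw [h.buffer]
  exact (h.m6 c h.chan).1

/-- The temp block lies inside the free part of the arena: `B + S ≤ v` and `v + 2n + 32 = B + L` (ADO, T3). -/
theorem Pre.tmp_range (h : Pre others frames len A stored room ysz k c ue) :
    A.B + A.S ≤ tmp A ue ∧ tmp A ue + 2 * n ue + 32 = A.B + A.T ∧ A.T = A.L ∧ tmp A ue % 8 = 0 := by
  have hf := h.isBlocksize.facts
  have h8 : r8 (2 * n ue) = 2 * n ue := r8_of_mod _ (by omega)
  have hroom := h.ado.room
  have hfull := h.ado.full
  have ht3 := h.t3
  have h1 := h.ado.ok.AR1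
  have h2 := h.ado.ok.AR2
  unfold tmp
  rw [h8]
  omega

/-- **Every allocated block is disjoint from the temp block and its red zone** (`offGap`). -/
theorem Pre.blk_off_tmp (h : Pre others frames len A stored room ysz k c ue) {B : Block} (hB : RunBlk A len B) :
    B.base + B.size ≤ tmp A ue ∨ A.B + A.T ≤ B.base := by
  have hr := h.tmp_range
  have hg := h.offGap B hB
  omega

/-- **The footprint of inverse_mdct in the form `DecodeInv.frame_stores` consumes** (for vorbis_decode_packet_rest.12, from
`Returned.same`; the allocated blocks are the run's, `RunBlk A len`): the stack area is off every allocated block (`offStack`), the buffer window lies in the sample buffer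
`channel_buffers[c]`, the temp block is off every allocated block (`offGap`), `temp_offset` is a decode-time hole of `*f`, the
shadow bytes are above every allocated block. -/
theorem storeOK {u₀ : State} {ret : Word} (h : Pre others frames len A stored room ysz k c ue)
    (he : AtEntry (conv u₀) L.inverse_mdct.entry (spec others frames len A stored room ysz k c).frame ret ue) (s : Span)
    (hs : s ∈ (spec others frames len A stored room ysz k c).footprint ue) : StoreOK (RunBlk A len) ue.mem (f ue) s := by
  have hroom := he.room
  have htop := he.top
  simp only [vspec, conv_stackLo, conv_stackHi] at hroom htop
  have hr := h.tmp_range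
  have hnle := h.n_le
  unfold Spec.footprint at hs
  simp only [inverse_mdct.spec_frame, inverse_mdct.spec_writes, List.mem_cons, List.mem_nil_iff, or_false] at hs
  rcases hs with rfl | rfl | rfl | rfl | rfl
  · -- the stack area
    apply StoreOK.off
    intro B hB
    have := h.offStack B hB
    simp only []
    omega
  · -- buffer[0 .. n)
    refine StoreOK.buffer ⟨stb_vorbis.channel_buffers ue.mem (f ue) c, 4 * bsize ue.mem (f ue) 1⟩ (SampleBuf.chan c h.chan) ?_ ?_
    · simp only []
      rw [← h.buffer]
      exact Nat.le_refl _
    · simp only []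
      rw [← h.buffer]
      omega
  · -- the temp block
    apply StoreOK.off
    intro B hB
    have := h.blk_off_tmp hB
    simp only []
    omega
  · -- temp_offset
    exact StoreOK.hole (InHole.of_field (f ue) 132 4 (by omega))
  · -- the shadow of the temp block and its red zone
    apply StoreOK.off
    intro B hB
    have hin := h.ok.inside B hB
    unfold shadowSpan
    simp only []
    omega

/-- **Every allocated block is live in the live set WITH the temp block** (the live set of `Body.shadow`): the hypothesis `hL` of
the USE lemmas (`Mdct.site_f32`, `Tables.site_A` …) and of `LiveBytes.of_block` inside the function. -/
theorem Pre.blkLive (h : Pre others frames len A stored room ysz k c ue) (o : Obj) :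
    BlkLive (RunBlk A len) (Live (stackObjs frames ++ o :: others)) := by
  intro B hB
  exact (LiveBytes.cons o (LiveBytes.of_inLive (h.live B hB))).block

/-- **The temp block `v` is live** (it is the new object itself): `2 n` bytes at `tmp A ue`. -/
theorem tmp_live (A : Arena) (ue : State) :
    LiveBytes (A.newTempObj (2 * n ue) :: others) frames (tmp A ue) (2 * n ue) := by
  apply LiveBytes.of_liveIn
  refine ⟨A.newTempObj (2 * n ue), List.mem_append_right _ List.mem_cons_self, ?_, ?_⟩
  · show A.B + (A.T - (r8 (2 * n ue) + 32)) ≤ tmp A ue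
    unfold tmp
    exact Nat.le_refl _
  · show tmp A ue + 2 * n ue ≤ A.B + (A.T - (r8 (2 * n ue) + 32)) + 2 * n ue
    unfold tmp
    exact Nat.le_refl _

/-- `*f` and the sample buffer are different allocated blocks, hence disjoint: their sizes differ (1808 is not `4 b1`). -/
theorem Pre.obj_off_buf (h : Pre others frames len A stored room ysz k c ue) :
    f ue + 1808 ≤ buf ue ∨ buf ue + 4 * bsize ue.mem (f ue) 1 ≤ f ue := by
  have hb1 := h.hd3.b1.facts
  have hd := h.ok.disjoint h.ob1 h.buf_blk (by
    intro e
    have := congrArg Block.size e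
    simp only [vblock, voff] at this
    omega)
  simp only [vblock, voff] at hd
  exact hd

/-- **THE FRAME RULE OF A SEGMENT OF inverse_mdct**: from the assertion's shared part at the segment's entry `v` to the shared
part at its exit `w`, when the segment (with its callees) wrote only stack below the entry rsp, floats of `buffer[0 .. n)` and
floats of the temp block — `hs`, by `u_same` from the walker's `w_mem` (and the callees' footprints) — and the frame facts hold
at `w` (`u_resolve` for the slots). The three derived parts come for free: the footprint so far (`same`), the busy arena (`*f` is
disjoint from all three windows: `offStack`, `Pre.obj_off_buf`, `offGap`), the shadow layer (no window meets the shadow). -/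
theorem Body.carry {u₀ : State} {ret : Word} {v w : State} (hb : Body u₀ others frames len A stored room ysz k c ue ret v)
    (hs : Mem.SameExcept
      [⟨(ue.reg .rsp).toNat - 368, (ue.reg .rsp).toNat⟩, ⟨buf ue, buf ue + 4 * n ue⟩, ⟨tmp A ue, tmp A ue + 2 * n ue⟩]
      v.mem w.mem)
    (hcode : CodeOK u₀ w.mem) (habi : abiInv w)
    (hrbp : w.reg .rbp = ue.reg .rsp - 8) (hrsp : w.reg .rsp = ue.reg .rsp - 184)
    (sret : UInt64.ofNat (w.mem.readLE (ue.reg .rsp) 8) = ret)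
    (srbp : UInt64.ofNat (w.mem.readLE (ue.reg .rsp - 8) 8) = ue.reg .rbp)
    (sr15 : UInt64.ofNat (w.mem.readLE (ue.reg .rsp - 16) 8) = ue.reg .r15)
    (sr14 : UInt64.ofNat (w.mem.readLE (ue.reg .rsp - 24) 8) = ue.reg .r14)
    (sr13 : UInt64.ofNat (w.mem.readLE (ue.reg .rsp - 32) 8) = ue.reg .r13)
    (sr12 : UInt64.ofNat (w.mem.readLE (ue.reg .rsp - 40) 8) = ue.reg .r12)
    (srbx : UInt64.ofNat (w.mem.readLE (ue.reg .rsp - 48) 8) = ue.reg .rbx)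
    (sf : UInt64.ofNat (w.mem.readLE (ue.reg .rsp - 128) 8) = ue.reg .rdx)
    (sbt : w.mem.readLE (ue.reg .rsp - 132) 4 = bt ue)
    (ssave : w.mem.readLE (ue.reg .rsp - 152) 4 = A.T)
    (sv : w.mem.readLE (ue.reg .rsp - 112) 8 = tmp A ue) :
    Body u₀ others frames len A stored room ysz k c ue ret w := by
  have hp := hb.pre
  have hroom := hb.entry.room
  have htop := hb.entry.top
  simp only [vspec, conv_stackLo, conv_stackHi] at hroom htop
  have hr := hp.tmp_range
  have hnle := hp.n_le
  have hbufin := hp.ok.inside _ hp.buf_blk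
  have hobin := hp.ok.inside _ hp.ob1
  have h1 := hp.ado.ok.AR1
  have h2 := hp.ado.ok.AR2
  simp only [vblock, voff] at hbufin hobin
  -- the footprint so far
  have hsame : Mem.SameExcept ((spec others frames len A stored room ysz k c).footprint ue) ue.mem w.mem := by
    apply hb.same.trans
    apply hs.mono
    intro x hx a ha1 ha2
    unfold Spec.footprint
    simp only [inverse_mdct.spec_frame, inverse_mdct.spec_writes]
    simp only [List.mem_cons, List.mem_nil_iff, or_false] at hx
    rcases hx with rfl | rfl | rfl
    · exact ⟨_, List.mem_cons_self, ha1, ha2⟩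
    · exact ⟨_, List.mem_cons_of_mem _ List.mem_cons_self, ha1, ha2⟩
    · exact ⟨_, List.mem_cons_of_mem _ (List.mem_cons_of_mem _ List.mem_cons_self), ha1, ha2⟩
  -- no window meets the shadow
  have hshadow : ShadowUntouched v.mem w.mem := by
    apply hs.eqOn
    intro x hx
    simp only [List.mem_cons, List.mem_nil_iff, or_false] at hx
    rcases hx with rfl | rfl | rfl <;> simp only [] <;> omega
  -- no window meets `*f`
  have hobj : (Vorbis.Block.mk (f ue) Off.sizeof.stb_vorbis).Same v.mem w.mem := by
    have hoS := hp.offStack _ hp.ob1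
    have hoB := hp.obj_off_buf
    have hoT := hp.blk_off_tmp hp.ob1
    simp only [vblock, voff] at hoS hoT ⊢
    apply hs.eqOn
    intro x hx
    simp only [List.mem_cons, List.mem_nil_iff, or_false] at hx
    rcases hx with rfl | rfl | rfl <;> simp only [] <;> omega
  exact
    { entry := hb.entry
      pre := hp
      code := hcode
      abi := habi
      rbp := hrbp
      rsp := hrsp
      retSlot := sret
      rbpSlot := srbp
      r15Slot := sr15
      r14Slot := sr14
      r13Slot := sr13
      r12Slot := sr12
      rbxSlot := srbx
      same := hsame
      busy := hb.busy.frame (by simp only [voff]; omega) hobj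
      shadow := hb.shadow.untouched hshadow
      fSlot := sf
      btSlot := sbt
      saveSlot := ssave
      vSlot := sv }

/-- The windows of `*f` that inverse_mdct never writes: everything but `temp_offset` `[132, 136)`. -/
def keptWins : Wins := [(0, 132), (136, 1808)]

/-- **`*f` reads as at the entry, except `temp_offset`**: the five pointer loads of the function (`A`, `bit_reverse`, `C`, `B`
of index `bt`; `alloc_buffer`) see the entry memory's values. `he.u64_elem 136 1808 (by decide) 1400 bt …` reads one. -/
theorem Body.objEq {u₀ : State} {ret : Word} {v : State} (hb : Body u₀ others frames len A stored room ysz k c ue ret v) :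
    ObjEq keptWins ue.mem (f ue) v.mem (f ue) := by
  have hp := hb.pre
  have hroom := hb.entry.room
  have htop := hb.entry.top
  simp only [vspec, conv_stackLo, conv_stackHi] at hroom htop
  have hr := hp.tmp_range
  have hnle := hp.n_le
  have hobin := hp.ok.inside _ hp.ob1
  have hoS := hp.offStack _ hp.ob1
  have hoB := hp.obj_off_buf
  have hoT := hp.blk_off_tmp hp.ob1
  simp only [vblock, voff] at hobin hoS hoT
  apply ObjEq.of_sameExcept hb.same
  · intro w hw
    simp only [keptWins, List.mem_cons, List.mem_nil_iff, or_false] at hw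
    rcases hw with rfl | rfl <;> simp only [] <;> omega
  · intro w hw s hs
    unfold Spec.footprint at hs
    simp only [inverse_mdct.spec_frame, inverse_mdct.spec_writes, List.mem_cons, List.mem_nil_iff, or_false] at hs
    simp only [keptWins, List.mem_cons, List.mem_nil_iff, or_false] at hw
    unfold shadowSpan at hs
    rcases hw with rfl | rfl <;> rcases hs with rfl | rfl | rfl | rfl | rfl <;> simp only [] <;> omega

/-- The pointer `f->A[bt]` read in the present memory is the entry's. -/
theorem Body.tabA_eq {u₀ : State} {ret : Word} {v : State} (hb : Body u₀ others frames len A stored room ysz k c ue ret v) :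
    stb_vorbis.A v.mem (f ue) (bt ue) = tabA ue := by
  have hbt := hb.pre.btLt
  rw [tabA_def]
  simp only [vacc, voff]
  exact hb.objEq.u64_elem 136 1808 (by decide) 1400 (bt ue) (by omega) (by omega)

/-- The pointer `f->B[bt]` read in the present memory is the entry's (segment 9, `add r12, [f + 588H + 8 bt]`). -/
theorem Body.tabB_eq {u₀ : State} {ret : Word} {v : State} (hb : Body u₀ others frames len A stored room ysz k c ue ret v) :
    stb_vorbis.B v.mem (f ue) (bt ue) = tabB ue := by
  have hbt := hb.pre.btLt
  rw [tabB_def]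
  simp only [vacc, voff]
  exact hb.objEq.u64_elem 136 1808 (by decide) 1416 (bt ue) (by omega) (by omega)

/-- The pointer `f->C[bt]` read in the present memory is the entry's (segment 8). -/
theorem Body.tabC_eq {u₀ : State} {ret : Word} {v : State} (hb : Body u₀ others frames len A stored room ysz k c ue ret v) :
    stb_vorbis.C v.mem (f ue) (bt ue) = tabC ue := by
  have hbt := hb.pre.btLt
  rw [tabC_def]
  simp only [vacc, voff]
  exact hb.objEq.u64_elem 136 1808 (by decide) 1432 (bt ue) (by omega) (by omega)

/-- The pointer `f->bit_reverse[bt]` read in the present memory is the entry's (segment 7). -/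
theorem Body.tabR_eq {u₀ : State} {ret : Word} {v : State} (hb : Body u₀ others frames len A stored room ysz k c ue ret v) :
    stb_vorbis.bit_reverse v.mem (f ue) (bt ue) = tabR ue := by
  have hbt := hb.pre.btLt
  rw [tabR_def]
  simp only [vacc, voff]
  exact hb.objEq.u64_elem 136 1808 (by decide) 1464 (bt ue) (by omega) (by omega)

/-- **M4 in the present memory** (segment 8's check sites `u[k4 + q]`: `Mdct.RevOK.site_u`): no window of the footprint meets the
bit-reverse table — the stack by `offStack`, the temp block by `offGap`, `*f` and the sample buffer because they are OTHER
allocated blocks (their sizes differ from `n / 4`). -/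
theorem Body.rev {u₀ : State} {ret : Word} {v : State} (hb : Body u₀ others frames len A stored room ysz k c ue ret v) :
    Mdct.RevOK v.mem (tabR ue) (n ue) := by
  have hp := hb.pre
  have hroom := hb.entry.room
  have htop := hb.entry.top
  simp only [vspec, conv_stackLo, conv_stackHi] at hroom htop
  have hr := hp.tmp_range
  have hnle := hp.n_le
  have hf := hp.isBlocksize.facts
  have hb1 := hp.hd3.b1.facts
  have hRin := hp.ok.inside _ hp.tabR_blk
  have hoS := hp.offStack _ hp.tabR_blk
  have hoT := hp.blk_off_tmp hp.tabR_blk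
  have hoF := hp.ok.disjoint hp.tabR_blk hp.ob1 (by
    intro e
    have := congrArg Block.size e
    simp only [vblock, voff] at this
    have := hp.isBlocksize.cases
    omega)
  have hoB := hp.ok.disjoint hp.tabR_blk hp.buf_blk (by
    intro e
    have := congrArg Block.size e
    simp only [] at this
    omega)
  simp only [vblock, voff] at hRin hoS hoT hoF hoB
  apply hp.rev.frame
  apply Block.Kept.of_sameExcept hb.same _ (by simp only []; omega)
  intro s hs
  unfold Spec.footprint at hs
  simp only [inverse_mdct.spec_frame, inverse_mdct.spec_writes, List.mem_cons, List.mem_nil_iff, or_false] at hs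
  unfold shadowSpan at hs
  rcases hs with rfl | rfl | rfl | rfl | rfl <;> simp only [] <;> omega

end inverse_mdct

/-- **inverse_mdct's precondition at its call site** (vorbis_decode_packet_rest.12, line 3443 `inverse_mdct(f->channel_buffers[i],
n, f, m->blockflag)`): the precondition is LITERALLY the shadow clause, the caller's decode-time invariant `DecodeInv` at the
callee's entry memory for the decoder object in rdx (decode_residue has released its temp block: ADO idle), and the facts about
the argument registers. The interface lemma between vorbis_decode_packet_rest and inverse_mdct. -/
theorem inverse_mdct.pre_of_fb {others : List Obj} {frames : List (Nat × FrameLayout)} {len : Nat} {A : Arena}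
    {stored room : Int} {ysz : Nat → Nat} {k c : Nat} {s : State}
    (hsh : ShadowPre others frames s)
    (hinv : DecodeInv others frames len A stored room ysz s.mem (inverse_mdct.f s))
    (hc : (c : Int) < stb_vorbis.channels s.mem (inverse_mdct.f s))
    (hbuf : inverse_mdct.buf s = stb_vorbis.channel_buffers s.mem (inverse_mdct.f s) c)
    (hbt : inverse_mdct.bt s < 2)
    (hn : inverse_mdct.n s = bsize s.mem (inverse_mdct.f s) (inverse_mdct.bt s))
    (hk : Mdct.Ld (inverse_mdct.n s) k) :
    inverse_mdct.Pre others frames len A stored room ysz k c s :=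
  ⟨hsh, hinv, hc, hbuf, hbt, hn, hk⟩

end Vorbis.Spec
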